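-- pv_equiv track=rewrite | github.com/Nakifaru/codility-group-12 | task1.py | solution
-- ===== SOURCE A (Python) =====
-- def solution(A):
--     desc = sorted(A, reverse=True)
--     answer = []
--
--     i = 0
--     for x in desc:
--         if x == desc[0] and answer.count(x) < 1:
--             answer.append(x)
--             i += 1
--         elif answer.count(x) < 2 and x != desc[0]:
--             if i % 2 == 0:
--                 answer.insert(0,x)
--             else:
--                 answer.append(x)
--         else:
--             i += 1
--
--     return len(answer)
-- ===== SOURCE B (Python) =====
-- def solution(A):
--     if not A:
--         return 0
--     counts = {}
--     for x in A:
--         counts[x] = counts.get(x, 0) + 1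
--     mx = max(counts)
--     total = 1
--     for v, c in counts.items():
--         if v != mx:
--             total += min(2, c)
--     return total
-- ===== Notes on version B (the rewrite author's own statement) =====
-- stated objective: faster
-- what changed: Drops A's sort and its growing answer list with quadratic answer.count scans entirely: B builds a value->count dictionary in one pass, takes max over the keys, and returns 1 plus min(2,count) summed over the other distinct values.
import Mathlib
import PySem

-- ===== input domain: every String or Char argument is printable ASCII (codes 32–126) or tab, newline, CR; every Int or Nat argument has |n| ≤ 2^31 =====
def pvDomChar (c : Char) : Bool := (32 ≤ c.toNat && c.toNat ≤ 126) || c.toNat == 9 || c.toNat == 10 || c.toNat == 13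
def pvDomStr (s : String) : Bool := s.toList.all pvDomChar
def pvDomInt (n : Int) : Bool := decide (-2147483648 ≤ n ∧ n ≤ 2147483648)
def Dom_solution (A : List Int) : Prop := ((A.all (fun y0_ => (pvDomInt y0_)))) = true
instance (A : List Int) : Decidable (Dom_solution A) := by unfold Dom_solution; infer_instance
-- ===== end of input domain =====

-- B drops A's sort and its growing answer list with nested answer.count scans: it builds a
-- value→count dictionary in one pass, takes max over the keys, and sums min(2, count) over the
-- non-maximal distinct values plus 1 for the maximum (objective: faster).

-- ===== PORT A =====
-- loop body of A; h is desc[0] (only read when the loop runs, i.e. desc nonempty)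
def solAStep (h : Int) (st : List Int × Int) (x : Int) : List Int × Int :=
  if x = h ∧ st.1.count x < 1 then (st.1 ++ [x], st.2 + 1)
  else if st.1.count x < 2 ∧ x ≠ h then
    (if PySem.Int.mod st.2 2 = 0 then x :: st.1 else st.1 ++ [x], st.2)
  else (st.1, st.2 + 1)

def solution (A : List Int) : Int :=
  let desc := PySem.List.sorted A (fun x => x) true
  let st := desc.foldl (solAStep (desc.headD 0)) ([], 0)
  (st.1.length : Int)

-- ===== PORT B =====
def solution_alt (A : List Int) : Int :=
  if A = [] then 0
  else
    let counts := A.foldl (fun d x => d.insert x (d.getD x 0 + 1)) PySem.Dict.empty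
    let mx := (PySem.List.max? counts.keys (fun k => k)).getD 0
    counts.items.foldl (fun t p => if p.1 ≠ mx then t + min 2 p.2 else t) 1

-- ===== PRECONDITION & SPEC =====
def Spec_solution (A : List Int) (out : Int) : Prop := out = solution_alt A
instance (A : List Int) (out : Int) : Decidable (Spec_solution A out) := by unfold Spec_solution; infer_instance

-- ===== CLAIM (what is proved, stated in full; the proofs are below) =====
def Claim_equal_solution : Prop := ∀ (A : List Int), Dom_solution A → Spec_solution A (solution A)

-- ===== LEMMAS AND PROOFS =====

-- capacity of a value v in A's answer list: the maximum (= h) is kept once, others twice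
def solCap (h v : Int) : Nat := if v = h then 1 else 2

-- one A-step keeps the multiset law "answer holds min(cap, seen-so-far) copies of each value"
lemma solAStep_count (h x : Int) (answer : List Int) (i : Int) (P : List Int)
    (hcnt : ∀ v, answer.count v = min (solCap h v) (P.count v)) :
    ∀ v, (solAStep h (answer, i) x).1.count v
      = min (solCap h v) ((P ++ [x]).count v) := by
  intro v
  have hAx : answer.count x = min (solCap h x) (P.count x) := hcnt x
  have hstep : (solAStep h (answer, i) x).1.count v
      = answer.count v + (if v = x ∧ P.count x < solCap h x then 1 else 0) := by
    by_cases hxh : x = h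
    · subst hxh
      have hcap : solCap x x = 1 := by simp [solCap]
      rw [hcap] at hAx ⊢
      by_cases hlt : P.count x < 1
      · have hcur : List.count x answer = 0 := by omega
        by_cases hv : v = x
        · subst hv; simp [solAStep, hcur, hlt, List.count_append]
        · simp [solAStep, hcur, hlt, List.count_append, hv, Ne.symm hv]
      · have hcur : ¬ List.count x answer < 1 := by omega
        simp [solAStep, hcur, hlt]
    · have hcap : solCap h x = 2 := by simp [solCap, hxh]
      rw [hcap] at hAx ⊢
      by_cases hlt : P.count x < 2
      · have hcur : List.count x answer < 2 := by omega
        by_cases hm : (2:Int) ∣ i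
        · by_cases hv : v = x
          · subst hv; simp [solAStep, hxh, hcur, hlt, hm]
          · simp [solAStep, hxh, hcur, hlt, hm, hv, Ne.symm hv]
        · by_cases hv : v = x
          · subst hv; simp [solAStep, hxh, hcur, hlt, hm, List.count_append]
          · simp [solAStep, hxh, hcur, hlt, hm, List.count_append, hv, Ne.symm hv]
      · have hcur : ¬ List.count x answer < 2 := by omega
        simp [solAStep, hxh, hcur, hlt]
  rw [hstep, hcnt v]
  by_cases hv : v = x
  · subst hv
    simp only [List.count_append, List.count_singleton]
    by_cases hlt : P.count v < solCap h v <;> simp [hlt] <;> omega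
  · have h0 : List.count v [x] = 0 := List.count_eq_zero.mpr (by simp [hv])
    simp [List.count_append, h0, hv]

-- the law propagates through the whole loop
lemma solA_counts (h : Int) : ∀ (rest P answer : List Int) (i : Int),
    (∀ v, answer.count v = min (solCap h v) (P.count v)) →
    ∀ v, ((rest.foldl (solAStep h) (answer, i)).1).count v
      = min (solCap h v) ((P ++ rest).count v) := by
  intro rest
  induction rest with
  | nil => intro P answer i hcnt v; simpa using hcnt v
  | cons x rest' ih =>
    intro P answer i hcnt v
    obtain ⟨A', i2, hA⟩ : ∃ a b, solAStep h (answer, i) x = (a, b) := ⟨_, _, rfl⟩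
    rw [List.foldl_cons, hA]
    have := ih (P ++ [x]) A' i2 (by
      intro w
      have := solAStep_count h x answer i P hcnt w
      rwa [hA] at this) v
    simpa [List.append_assoc] using this

-- a list obeying that law has length ∑_{v ∈ L.toFinset} min(cap v, L.count v)
lemma length_of_counts (h : Int) (ans L : List Int)
    (hcnt : ∀ v, ans.count v = min (solCap h v) (L.count v)) :
    ans.length = ∑ v ∈ L.toFinset, min (solCap h v) (L.count v) := by
  have hsub : ans.toFinset ⊆ L.toFinset := by
    intro v hv
    rw [List.mem_toFinset] at hv ⊢
    have : 0 < ans.count v := List.count_pos_iff.mpr hv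
    rw [hcnt v] at this
    have : 0 < L.count v := by
      rcases Nat.lt_min.mp this with ⟨_, h2⟩; exact h2
    exact List.count_pos_iff.mp this
  rw [← List.sum_toFinset_count_eq_length ans,
      Finset.sum_subset hsub
        (fun v _ hv => List.count_eq_zero.mpr (fun hm => hv (List.mem_toFinset.mpr hm)))]
  exact Finset.sum_congr rfl (fun v _ => hcnt v)

-- B's accumulation loop is a sum
lemma foldl_ite_add (mx : Int) : ∀ (l : List (Int × Int)) (a : Int),
    l.foldl (fun t p => if p.1 ≠ mx then t + min 2 p.2 else t) a
      = a + (l.map (fun p => if p.1 ≠ mx then min 2 p.2 else 0)).sum := by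
  intro l
  induction l with
  | nil => intro a; simp
  | cons p l' ih =>
    intro a
    simp only [List.foldl_cons, List.map_cons, List.sum_cons]
    by_cases hp : p.1 ≠ mx
    · rw [if_pos hp, if_pos hp, ih]; ring
    · rw [if_neg hp, if_neg hp, ih]; ring

-- ===== VERDICT (by name: the statement is the Claim_ definition above) =====
theorem solution_spec : Claim_equal_solution := by
  intro A _
  unfold Spec_solution
  by_cases hA : A = []
  · subst hA; rfl
  · -- both heads name the maximum of A
    unfold solution solution_alt
    simp only [if_neg hA]
    have hs : PySem.List.sorted A (fun x => x) true ≠ [] := by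
      simpa [PySem.List.sorted_eq_nil_iff] using hA
    obtain ⟨m, t, hmt⟩ := List.exists_cons_of_ne_nil hs
    have hmmax : ∀ y ∈ A, y ≤ m := PySem.List.key_head_sorted_rev_ge A (fun x => x) hmt
    have hmmem : m ∈ A := by
      have : m ∈ PySem.List.sorted A (fun x => x) true := by rw [hmt]; exact List.mem_cons_self
      rwa [PySem.List.mem_sorted] at this
    -- the dictionary B builds is Counter(A)
    rw [PySem.Dict.foldl_insert_getD_add_one_eq_counter]
    -- its key maximum is m
    have hkeys : (PySem.Dict.counter A).keys = PySem.Set.ofList A := PySem.Dict.keys_counter A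
    obtain ⟨m', hm'⟩ : ∃ m', PySem.List.max? (PySem.Dict.counter A).keys (fun k => k) = some m' := by
      rcases Option.eq_none_or_eq_some (PySem.List.max? (PySem.Dict.counter A).keys (fun k => k)) with h0 | h0
      · exfalso
        rw [PySem.List.max?_eq_none_iff, hkeys] at h0
        have := (PySem.Set.mem_ofList A m).mpr hmmem
        rw [h0] at this; simp at this
      · exact h0
    have hm'mem : m' ∈ A := by
      have := PySem.List.max?_mem hm'
      rwa [hkeys, PySem.Set.mem_ofList] at this
    have hm'max : ∀ y ∈ A, y ≤ m' := by
      intro y hy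
      exact PySem.List.max?_isMax hm' y (by rwa [hkeys, PySem.Set.mem_ofList])
    have hmm' : m' = m := le_antisymm (hmmax m' hm'mem) (hm'max m hmmem)
    have hmx : (PySem.List.max? (PySem.Dict.counter A).keys (fun k => k)).getD 0 = m := by
      rw [hm', hmm']; rfl
    rw [hmx]
    simp only [hmt, List.headD_cons]
    -- A's side: the loop's answer length as a sum over distinct values
    have hcnt := solA_counts m (m :: t) [] [] 0 (by intro v; simp)
    have hlen := length_of_counts m _ (m :: t) (by simpa using hcnt)
    rw [← hmt] at hlen
    have hperm : (PySem.List.sorted A (fun x => x) true).Perm A :=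
      PySem.List.sorted_perm A (fun x => x) true
    have htf : (PySem.List.sorted A (fun x => x) true).toFinset = A.toFinset := by
      ext v; simp [List.mem_toFinset, hperm.mem_iff]
    have hcount : ∀ v, (PySem.List.sorted A (fun x => x) true).count v = A.count v :=
      fun v => hperm.count_eq v
    rw [htf] at hlen
    simp only [hcount] at hlen
    rw [List.foldl_cons, hlen]
    -- B's side: the items loop as the same sum
    rw [PySem.Dict.items_counter]
    rw [foldl_ite_add, List.map_map]
    have hofl : (PySem.Set.ofList A).toFinset = A.toFinset := by
      ext v; simp [List.mem_toFinset, PySem.Set.mem_ofList]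
    rw [← List.sum_toFinset _ (PySem.Set.nodup_ofList A), hofl]
    -- compare the two sums over A.toFinset, peeling off the maximum m
    have hmF : m ∈ A.toFinset := List.mem_toFinset.mpr hmmem
    rw [← Finset.add_sum_erase _ _ hmF, ← Finset.add_sum_erase _ _ hmF]
    have hcm : min (solCap m m) (A.count m) = 1 := by
      have : 0 < A.count m := List.count_pos_iff.mpr hmmem
      simp [solCap]; omega
    push_cast [hcm]
    congr 1
    simp only [Function.comp_apply]
    rw [if_neg (by simp), zero_add]
    apply Finset.sum_congr rfl
    intro v hv
    have hvm : v ≠ m := Finset.ne_of_mem_erase hv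
    simp [solCap, hvm]
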